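-- pv_equiv track=rewrite | github.com/AishaKin/MathCode2024 | homework02/caesar.py | caesar_breaker_brute_force
-- ===== SOURCE A (Python) =====
-- import typing as tp
--
-- def caesar_breaker_brute_force(ciphertext: str, dictionary: tp.Set[str]) -> int:
--     def score(decrypted_text: str) -> int:
--         words = decrypted_text.split()
--         return sum(1 for word in words if word.lower() in dictionary)
--
--     best_shift = 0
--     max_score = 0
--
--     for shift in range(26):
--         decrypted_text = ""
--         for char in ciphertext:
--             if char.isalpha():
--                 decrypted_char = chr((ord(char.lower()) - ord('a') - shift) % 26 + ord('a'))
--                 decrypted_char = decrypted_char.upper() if char.isupper() else decrypted_char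
--                 decrypted_text += decrypted_char
--             else:
--                 decrypted_text += char
--
--         current_score = score(decrypted_text)
--         if current_score > max_score:
--             max_score = current_score
--             best_shift = shift
--
--     return best_shift
-- ===== SOURCE B (Python) =====
-- # B: one pass over the text voting for each word's implied shift, via a dictionary
-- # index keyed by the shift-invariant canonical form of each word.
-- def caesar_breaker_brute_force(ciphertext: str, dictionary) -> int:
--     def first_lower(s):
--         for ch in s:
--             if 'a' <= ch <= 'z':
--                 return ord(ch) - ord('a')
--         return None
--
--     def canon(v, s):
--         return ''.join(chr((ord(ch) - ord('a') - v) % 26 + ord('a')) if 'a' <= ch <= 'z' else ch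
--                        for ch in s)
--
--     pairs = []
--     for e in set(dictionary):
--         v = first_lower(e)
--         if v is not None:
--             pairs.append((canon(v, e), v))
--     index = {}
--     for k, v in pairs:
--         index[k] = index.get(k, []) + [v]
--     voted = []
--     for word in ciphertext.split():
--         w = word.lower()
--         vw = first_lower(w)
--         if vw is not None:
--             for ve in index.get(canon(vw, w), []):
--                 voted.append((vw - ve) % 26)
--     votes = {}
--     for s in voted:
--         votes[s] = votes.get(s, 0) + 1
--     best_shift, max_votes = 0, 0
--     for s in range(26):
--         if votes.get(s, 0) > max_votes:
--             best_shift, max_votes = s, votes.get(s, 0)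
--     return best_shift
-- ===== Notes on version B (the rewrite author's own statement) =====
-- stated objective: faster
-- what changed: Instead of decrypting the whole text 26 times and re-scoring each candidate shift, B indexes the dictionary once by a shift-invariant canonical form (letters rotated so the first lowercase letter becomes 'a'), then makes a single pass over the text in which each word looks up its canonical form and votes for the shifts implied by the matching dictionary entries; the best shift is the first argmax of the vote counts.
import Mathlib
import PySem

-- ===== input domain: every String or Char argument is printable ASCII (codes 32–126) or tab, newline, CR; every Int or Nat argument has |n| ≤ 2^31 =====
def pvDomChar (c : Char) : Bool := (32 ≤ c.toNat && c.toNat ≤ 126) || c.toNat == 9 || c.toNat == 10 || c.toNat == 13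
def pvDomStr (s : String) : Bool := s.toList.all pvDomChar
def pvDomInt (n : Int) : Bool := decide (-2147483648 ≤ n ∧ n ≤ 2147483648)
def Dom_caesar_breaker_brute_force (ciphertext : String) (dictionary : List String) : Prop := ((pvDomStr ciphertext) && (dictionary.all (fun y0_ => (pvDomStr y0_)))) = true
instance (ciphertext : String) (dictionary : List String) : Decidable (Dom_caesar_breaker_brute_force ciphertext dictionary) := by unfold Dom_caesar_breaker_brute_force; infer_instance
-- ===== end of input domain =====

-- B replaces A's 26 decrypt-and-score passes by a single voting pass over the text using a
-- dictionary index keyed by a shift-invariant canonical word form (measurably faster).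


-- ===== PORT A =====
-- A's per-character decryption (body of A's inner `for char in ciphertext` loop)
def pvDecChar (shift : Int) (c : Char) : Char :=
  if PySem.Chars.isalpha c then
    let d := Char.ofNat ((PySem.Int.mod (((PySem.Chars.lowerChar c).toNat : Int) - 97 - shift) 26) + 97).toNat
    if PySem.Chars.isupper c then PySem.Chars.upperChar d else d
  else c

-- A's local helper `score`: sum(1 for word in words if word.lower() in dictionary)
def pvScoreA (dictionary : List String) (t : List Char) : Int :=
  ((PySem.Chars.split₀ t).map (fun w =>
    if dictionary.any (fun e => e.toList == PySem.Chars.lower w) then (1:Int) else 0)).sum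

def caesar_breaker_brute_force (ciphertext : String) (dictionary : List String) : Int :=
  ((PySem.List.pyRange 0 26 1).foldl (fun st shift =>
    let decrypted := ciphertext.toList.foldl (fun acc c => acc ++ [pvDecChar shift c]) []
    let cur := pvScoreA dictionary decrypted
    if cur > st.2 then (shift, cur) else st) ((0:Int), (0:Int))).1

-- ===== PORT B =====
-- first_lower: value (0..25) of the first lowercase ASCII letter, if any
def pvFirstLower : List Char → Option Int
  | [] => none
  | c :: rest => if PySem.Chars.islower c then some ((c.toNat : Int) - 97) else pvFirstLower rest

-- canon's per-character body: rotate a lowercase letter down by k, keep everything else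
def pvSdChar (k : Int) (c : Char) : Char :=
  if PySem.Chars.islower c then Char.ofNat ((PySem.Int.mod ((c.toNat : Int) - 97 - k) 26) + 97).toNat
  else c

def pvCanon (v : Int) (s : List Char) : List Char := s.map (pvSdChar v)

-- B's `pairs` loop over set(dictionary)
def pvPairsB (dictionary : List String) : List (List Char × Int) :=
  (PySem.Set.ofList dictionary).foldl (fun ps e =>
    match pvFirstLower e.toList with
    | some v => ps ++ [(pvCanon v e.toList, v)]
    | none => ps) []

-- B's `index` loop: index[k] = index.get(k, []) + [v]
def pvIndexB (dictionary : List String) : PySem.Dict (List Char) (List Int) :=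
  (pvPairsB dictionary).foldl (fun d p => d.modify p.1 [] (· ++ [p.2])) PySem.Dict.empty

-- B's `voted` loop over ciphertext.split()
def pvVotedB (text : List Char) (dictionary : List String) : List Int :=
  (PySem.Chars.split₀ text).foldl (fun acc word =>
    let w := PySem.Chars.lower word
    match pvFirstLower w with
    | some vw => ((pvIndexB dictionary).getD (pvCanon vw w) []).foldl
        (fun a ve => a ++ [PySem.Int.mod (vw - ve) 26]) acc
    | none => acc) []

-- B's `votes` counting loop
def pvVotesB (text : List Char) (dictionary : List String) : PySem.Dict Int Int :=
  (pvVotedB text dictionary).foldl (fun d s => d.insert s (d.getD s 0 + 1)) PySem.Dict.empty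

def caesar_breaker_brute_force_alt (ciphertext : String) (dictionary : List String) : Int :=
  ((PySem.List.pyRange 0 26 1).foldl (fun st s =>
    if (pvVotesB ciphertext.toList dictionary).getD s 0 > st.2
    then (s, (pvVotesB ciphertext.toList dictionary).getD s 0) else st) ((0:Int), (0:Int))).1

-- ===== PRECONDITION & SPEC =====
def Spec_caesar_breaker_brute_force (ciphertext : String) (dictionary : List String) (out : Int) : Prop := out = caesar_breaker_brute_force_alt ciphertext dictionary
instance (ciphertext : String) (dictionary : List String) (out : Int) : Decidable (Spec_caesar_breaker_brute_force ciphertext dictionary out) := by unfold Spec_caesar_breaker_brute_force; infer_instance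

-- ===== CLAIM (what is proved, stated in full; the proofs are below) =====
def Claim_equal_caesar_breaker_brute_force : Prop := ∀ (ciphertext : String) (dictionary : List String), Dom_caesar_breaker_brute_force ciphertext dictionary → Spec_caesar_breaker_brute_force ciphertext dictionary (caesar_breaker_brute_force ciphertext dictionary)

-- ===== LEMMAS AND PROOFS =====


theorem charToNatInj {c c' : Char} (h : c.toNat = c'.toNat) : c = c' := by
  apply Char.ext; exact UInt32.toNat_inj.mp h

theorem charLeIff (a b : Char) : a ≤ b ↔ a.toNat ≤ b.toNat := by
  rw [Char.le_def, UInt32.le_iff_toNat_le]; rfl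

theorem islowerIff (c : Char) : PySem.Chars.islower c = true ↔ 97 ≤ c.toNat ∧ c.toNat ≤ 122 := by
  simp [PySem.Chars.islower, charLeIff]

theorem isupperIff (c : Char) : PySem.Chars.isupper c = true ↔ 65 ≤ c.toNat ∧ c.toNat ≤ 90 := by
  simp [PySem.Chars.isupper, charLeIff]

theorem modIntEq (a : Int) : PySem.Int.mod a 26 = a% 26 := by
  rw [PySem.Int.mod_eq_emod_of_pos (by norm_num)]

theorem sdCharToNat (k : Int) (c : Char) (h : PySem.Chars.islower c = true) :
    ((pvSdChar k c).toNat : Int) = ((c.toNat : Int) - 97 - k)% 26 + 97 := by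
  have h1 : (0:Int) ≤ ((c.toNat : Int) - 97 - k)% 26 := Int.emod_nonneg _ (by norm_num)
  have h2 : ((c.toNat : Int) - 97 - k)% 26 < 26 := Int.emod_lt_of_pos _ (by norm_num)
  simp only [pvSdChar, h, if_pos, modIntEq]
  rw [Char.toNat_ofNat, if_pos]
  · omega
  · unfold Nat.isValidChar; left; omega

theorem islowerSdChar (k : Int) (c : Char) : PySem.Chars.islower (pvSdChar k c) = PySem.Chars.islower c := by
  by_cases h : PySem.Chars.islower c = true
  · have e := sdCharToNat k c h
    have h1 : (0:Int) ≤ ((c.toNat : Int) - 97 - k) % 26 := Int.emod_nonneg _ (by norm_num)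
    have h2 : ((c.toNat : Int) - 97 - k) % 26 < 26 := Int.emod_lt_of_pos _ (by norm_num)
    rw [h]; rw [islowerIff]; omega
  · simp only [Bool.not_eq_true] at h; simp [pvSdChar, h]

theorem sdCharOfNotLower (k : Int) (c : Char) (h : PySem.Chars.islower c = false) : pvSdChar k c = c := by
  simp [pvSdChar, h]

theorem sdCharComp (a b : Int) (c : Char) : pvSdChar b (pvSdChar a c) = pvSdChar (a + b) c := by
  by_cases h : PySem.Chars.islower c = true
  · have hl : PySem.Chars.islower (pvSdChar a c) = true := by rw [islowerSdChar, h]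
    apply charToNatInj
    have e1 := sdCharToNat b (pvSdChar a c) hl
    have e2 := sdCharToNat a c h
    have e3 := sdCharToNat (a + b) c h
    have : ((pvSdChar a c).toNat : Int) - 97 - b = (((c.toNat : Int) - 97 - a)% 26) - b := by omega
    rw [this] at e1
    have : (((c.toNat : Int) - 97 - a)% 26 - b)% 26 = ((c.toNat : Int) - 97 - (a + b))% 26 := by
      conv_rhs => rw [show (c.toNat : Int) - 97 - (a + b) = ((c.toNat : Int) - 97 - a) - b by ring]
      rw [Int.sub_emod, Int.sub_emod ((c.toNat : Int) - 97 - a) b, Int.emod_emod_of_dvd _ (by norm_num)]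
    omega
  · have h' : PySem.Chars.islower c = false := by simpa using h
    rw [sdCharOfNotLower a c h', sdCharOfNotLower b c h', sdCharOfNotLower (a+b) c h']

theorem sdCharCongr (a b : Int) (c : Char) (h : a% 26 = b% 26) : pvSdChar a c = pvSdChar b c := by
  by_cases hl : PySem.Chars.islower c = true
  · apply charToNatInj
    have e1 := sdCharToNat a c hl
    have e2 := sdCharToNat b c hl
    have : ((c.toNat : Int) - 97 - a)% 26 = ((c.toNat : Int) - 97 - b)% 26 := by
      rw [Int.sub_emod, Int.sub_emod _ b, h]
    omega
  · have h' : PySem.Chars.islower c = false := by simpa using hl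
    rw [sdCharOfNotLower a c h', sdCharOfNotLower b c h']

theorem sdCharZero (c : Char) : pvSdChar 0 c = c := by
  by_cases hl : PySem.Chars.islower c = true
  · apply charToNatInj
    have e := sdCharToNat 0 c hl
    have hb := (islowerIff c).mp hl
    have h0 : (0:Int) ≤ (c.toNat : Int) - 97 - 0 := by omega
    have h1 : (c.toNat : Int) - 97 - 0 < 26 := by omega
    have h2 : ((c.toNat : Int) - 97 - 0) % 26 = (c.toNat : Int) - 97 - 0 := Int.emod_eq_of_lt h0 h1
    omega
  · exact sdCharOfNotLower 0 c (by simpa using hl)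

theorem sdCharCancel (a : Int) (c : Char) : pvSdChar (-a) (pvSdChar a c) = c := by
  rw [sdCharComp]; simpa using sdCharZero c

theorem lowerCharToNat (c : Char) : (PySem.Chars.lowerChar c).toNat = if 65 ≤ c.toNat ∧ c.toNat ≤ 90 then c.toNat + 32 else c.toNat := by
  by_cases h : PySem.Chars.isupper c = true
  · have hb := (isupperIff c).mp h
    simp only [PySem.Chars.lowerChar, h, if_pos, hb]
    rw [Char.toNat_ofNat, if_pos (by unfold Nat.isValidChar; left; omega)]
    simp
  · have hb : ¬ (65 ≤ c.toNat ∧ c.toNat ≤ 90) := fun hc => h ((isupperIff c).mpr hc)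
    simp [PySem.Chars.lowerChar, h, hb]

theorem lowerDecChar (s : Int) (c : Char) :
    PySem.Chars.lowerChar (pvDecChar s c) = pvSdChar s (PySem.Chars.lowerChar c) := by
  have hmn : (0:Int) ≤ (((PySem.Chars.lowerChar c).toNat : Int) - 97 - s) % 26 := Int.emod_nonneg _ (by norm_num)
  have hml : (((PySem.Chars.lowerChar c).toNat : Int) - 97 - s) % 26 < 26 := Int.emod_lt_of_pos _ (by norm_num)
  have hdN : ((Char.ofNat ((PySem.Int.mod (((PySem.Chars.lowerChar c).toNat : Int) - 97 - s) 26) + 97).toNat).toNat : Int)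
      = (((PySem.Chars.lowerChar c).toNat : Int) - 97 - s) % 26 + 97 := by
    rw [modIntEq, Char.toNat_ofNat, if_pos (by unfold Nat.isValidChar; left; omega)]
    omega
  by_cases ha : PySem.Chars.isalpha c = true
  · have hlc : PySem.Chars.islower (PySem.Chars.lowerChar c) = true := by
      rw [islowerIff, lowerCharToNat]
      rcases (Bool.or_eq_true _ _).mp (by simpa [PySem.Chars.isalpha] using ha) with h | h
      · have := (isupperIff c).mp h; split_ifs; omega
      · have := (islowerIff c).mp h; split_ifs <;> omega
    have hsd := sdCharToNat s (PySem.Chars.lowerChar c) hlc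
    by_cases hu : PySem.Chars.isupper c = true
    · -- result is upperChar d; lowerChar (upperChar d) = d
      simp only [pvDecChar, ha, if_pos, hu, if_pos]
      apply charToNatInj
      have hdl : PySem.Chars.islower (Char.ofNat ((PySem.Int.mod (((PySem.Chars.lowerChar c).toNat : Int) - 97 - s) 26) + 97).toNat) = true := by
        rw [islowerIff]; omega
      have hdb := (islowerIff _).mp hdl
      simp only [PySem.Chars.upperChar, hdl, if_pos]
      have hvu : (Char.ofNat ((Char.ofNat ((PySem.Int.mod (((PySem.Chars.lowerChar c).toNat : Int) - 97 - s) 26) + 97).toNat).toNat - 32)).toNat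
          = (Char.ofNat ((PySem.Int.mod (((PySem.Chars.lowerChar c).toNat : Int) - 97 - s) 26) + 97).toNat).toNat - 32 := by
        rw [Char.toNat_ofNat, if_pos (by unfold Nat.isValidChar; left; omega)]
      have hup : PySem.Chars.isupper (Char.ofNat ((Char.ofNat ((PySem.Int.mod (((PySem.Chars.lowerChar c).toNat : Int) - 97 - s) 26) + 97).toNat).toNat - 32)) = true := by
        rw [isupperIff, hvu]; omega
      rw [lowerCharToNat]
      rw [hvu]
      have := (isupperIff _).mp hup
      rw [hvu] at this
      rw [if_pos this]
      omega
    · simp only [pvDecChar, ha, if_pos, hu]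
      simp only [Bool.false_eq_true, if_false]
      apply charToNatInj
      rw [lowerCharToNat]
      have : ¬ (65 ≤ ((Char.ofNat ((PySem.Int.mod (((PySem.Chars.lowerChar c).toNat : Int) - 97 - s) 26) + 97).toNat)).toNat ∧ ((Char.ofNat ((PySem.Int.mod (((PySem.Chars.lowerChar c).toNat : Int) - 97 - s) 26) + 97).toNat)).toNat ≤ 90) := by omega
      rw [if_neg this]
      omega
  · -- non-alpha: both sides are c / lowerChar c = c, sd fixes it
    have hna : PySem.Chars.isalpha c = false := by simpa using ha
    have hu : PySem.Chars.isupper c = false := by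
      rcases (Bool.or_eq_false_iff).mp (by simpa [PySem.Chars.isalpha] using hna) with ⟨h1, _⟩; exact h1
    have hl : PySem.Chars.islower c = false := by
      rcases (Bool.or_eq_false_iff).mp (by simpa [PySem.Chars.isalpha] using hna) with ⟨_, h2⟩; exact h2
    have hlc : PySem.Chars.lowerChar c = c := by simp [PySem.Chars.lowerChar, hu]
    rw [show pvDecChar s c = c by simp [pvDecChar, hna], hlc, sdCharOfNotLower s c hl]

theorem isspaceIffNat (c : Char) : PySem.Chars.isspace c = true ↔
    (c.toNat = 32 ∨ (9 ≤ c.toNat ∧ c.toNat ≤ 13) ∨ (28 ≤ c.toNat ∧ c.toNat ≤ 31) ∨ c.toNat = 133 ∨ c.toNat = 160 ∨ c.toNat = 5760 ∨ (8192 ≤ c.toNat ∧ c.toNat ≤ 8202) ∨ c.toNat = 8232 ∨ c.toNat = 8233 ∨ c.toNat = 8239 ∨ c.toNat = 8287 ∨ c.toNat = 12288) := by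
  simp [PySem.Chars.isspace]; tauto

theorem isspaceDecChar (s : Int) (c : Char) : PySem.Chars.isspace (pvDecChar s c) = PySem.Chars.isspace c := by
  by_cases ha : PySem.Chars.isalpha c = true
  · have hcs : PySem.Chars.isspace c = false := by
      rcases (Bool.or_eq_true _ _).mp (by simpa [PySem.Chars.isalpha] using ha) with h | h
      · have := (isupperIff c).mp h
        rw [Bool.eq_false_iff]; intro hs; have := (isspaceIffNat c).mp hs; omega
      · have := (islowerIff c).mp h
        rw [Bool.eq_false_iff]; intro hs; have := (isspaceIffNat c).mp hs; omega
    rw [hcs]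
    have hmn : (0:Int) ≤ (((PySem.Chars.lowerChar c).toNat : Int) - 97 - s) % 26 := Int.emod_nonneg _ (by norm_num)
    have hml : (((PySem.Chars.lowerChar c).toNat : Int) - 97 - s) % 26 < 26 := Int.emod_lt_of_pos _ (by norm_num)
    have hdN : ((Char.ofNat ((PySem.Int.mod (((PySem.Chars.lowerChar c).toNat : Int) - 97 - s) 26) + 97).toNat).toNat : Int)
        = (((PySem.Chars.lowerChar c).toNat : Int) - 97 - s) % 26 + 97 := by
      rw [modIntEq, Char.toNat_ofNat, if_pos (by unfold Nat.isValidChar; left; omega)]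
      omega
    by_cases hu : PySem.Chars.isupper c = true
    · simp only [pvDecChar, ha, if_pos, hu]
      have hdl : PySem.Chars.islower (Char.ofNat ((PySem.Int.mod (((PySem.Chars.lowerChar c).toNat : Int) - 97 - s) 26) + 97).toNat) = true := by
        rw [islowerIff]; omega
      have hdb := (islowerIff _).mp hdl
      simp only [PySem.Chars.upperChar, hdl, if_pos]
      have hvu : (Char.ofNat ((Char.ofNat ((PySem.Int.mod (((PySem.Chars.lowerChar c).toNat : Int) - 97 - s) 26) + 97).toNat).toNat - 32)).toNat
          = (Char.ofNat ((PySem.Int.mod (((PySem.Chars.lowerChar c).toNat : Int) - 97 - s) 26) + 97).toNat).toNat - 32 := by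
        rw [Char.toNat_ofNat, if_pos (by unfold Nat.isValidChar; left; omega)]
      rw [Bool.eq_false_iff]; intro hs; have := (isspaceIffNat _).mp hs; rw [hvu] at this; omega
    · simp only [pvDecChar, ha, if_pos, hu]
      simp only [Bool.false_eq_true, if_false]
      rw [Bool.eq_false_iff]; intro hs; have := (isspaceIffNat _).mp hs; omega
  · simp [pvDecChar, (by simpa using ha : PySem.Chars.isalpha c = false)]

theorem split0GoMap (f : Char → Char) (hf : ∀ c, PySem.Chars.isspace (f c) = PySem.Chars.isspace c) :
    ∀ (s cur : List Char) (acc : List (List Char)),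
      PySem.Chars.split₀.go (s.map f) (cur.map f) (acc.map (List.map f)) =
        (PySem.Chars.split₀.go s cur acc).map (List.map f)
  | [], cur, acc => by
    simp only [List.map_nil, PySem.Chars.split₀.go]
    by_cases hc : cur.isEmpty = true
    · simp [List.isEmpty_iff.mp hc]
    · have hc' : cur.isEmpty = false := by simpa using hc
      simp [hc', List.map_reverse]
  | c :: rest, cur, acc => by
    simp only [List.map_cons, PySem.Chars.split₀.go, hf c]
    by_cases hs : PySem.Chars.isspace c = true
    · simp only [hs, if_pos]
      by_cases hc : cur = []
      · subst hc
        simpa using split0GoMap f hf rest [] acc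
      · have h2 : cur.isEmpty = false := by simpa using hc
        have h1 : (cur.map f).isEmpty = false := by simpa using hc
        simp only [h1, h2, Bool.false_eq_true, if_false]
        have := split0GoMap f hf rest [] (cur.reverse :: acc)
        simpa [List.map_reverse] using this
    · have hs' : PySem.Chars.isspace c = false := by simpa using hs
      simp only [hs', Bool.false_eq_true, if_false]
      have := split0GoMap f hf rest (c :: cur) acc
      simpa using this

theorem split0Map (f : Char → Char) (hf : ∀ c, PySem.Chars.isspace (f c) = PySem.Chars.isspace c) (l : List Char) :
    PySem.Chars.split₀ (l.map f) = (PySem.Chars.split₀ l).map (List.map f) := by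
  simpa using split0GoMap f hf l [] []

theorem firstLowerMapSd (k : Int) : ∀ (l : List Char),
    pvFirstLower (l.map (pvSdChar k)) = (pvFirstLower l).map (fun v => (v - k) % 26)
  | [] => rfl
  | c :: rest => by
    simp only [List.map_cons, pvFirstLower, islowerSdChar]
    by_cases h : PySem.Chars.islower c = true
    · have := sdCharToNat k c h
      simp only [h, if_pos, Option.map_some]
      congr 1
      omega
    · have h' : PySem.Chars.islower c = false := by simpa using h
      simp only [h', Bool.false_eq_true, if_false]
      exact firstLowerMapSd k rest

theorem firstLowerNone : ∀ (l : List Char), pvFirstLower l = none → ∀ c ∈ l, PySem.Chars.islower c = false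
  | [], _, c, hc => by cases hc
  | c :: rest, h, d, hd => by
    simp only [pvFirstLower] at h
    by_cases hl : PySem.Chars.islower c = true
    · simp [hl] at h
    · have hl' : PySem.Chars.islower c = false := by simpa using hl
      rw [hl'] at h; simp at h
      rcases List.mem_cons.mp hd with hd1 | hd1
      · subst hd1; exact hl'
      · exact firstLowerNone rest h d hd1

theorem firstLowerBounds : ∀ (l : List Char) (v : Int), pvFirstLower l = some v → 0 ≤ v ∧ v < 26
  | [], v, h => by cases h
  | c :: rest, v, h => by
    simp only [pvFirstLower] at h
    by_cases hl : PySem.Chars.islower c = true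
    · rw [hl] at h; simp at h
      have := (islowerIff c).mp hl
      omega
    · have hl' : PySem.Chars.islower c = false := by simpa using hl
      rw [hl'] at h; simp at h
      exact firstLowerBounds rest v h

theorem mapSdOfFirstNone (k : Int) (l : List Char) (h : pvFirstLower l = none) : l.map (pvSdChar k) = l := by
  have : l.map (pvSdChar k) = l.map id :=
    List.map_congr_left (fun c hc => by rw [sdCharOfNotLower k c (firstLowerNone l h c hc)]; rfl)
  simpa using this

theorem mapSdCancel (a : Int) (l : List Char) : (l.map (pvSdChar a)).map (pvSdChar (-a)) = l := by
  rw [List.map_map]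
  have : (pvSdChar (-a) ∘ pvSdChar a) = id := funext (fun c => sdCharCancel a c)
  rw [this, List.map_id]

theorem mapSdComp (a b : Int) (l : List Char) : (l.map (pvSdChar a)).map (pvSdChar b) = l.map (pvSdChar (a + b)) := by
  rw [List.map_map]
  exact List.map_congr_left (fun c _ => sdCharComp a b c)

theorem mapSdCongr (a b : Int) (l : List Char) (h : a % 26 = b % 26) : l.map (pvSdChar a) = l.map (pvSdChar b) :=
  List.map_congr_left (fun c _ => sdCharCongr a b c h)

theorem matchLemma (e wl : List Char) (vw : Int) (hw : pvFirstLower wl = some vw)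
    (s : Int) (hs0 : 0 ≤ s) (hs26 : s < 26) :
    (∃ ve, pvFirstLower e = some ve ∧ pvCanon ve e = pvCanon vw wl ∧ PySem.Int.mod (vw - ve) 26 = s)
      ↔ e = wl.map (pvSdChar s) := by
  constructor
  · rintro ⟨ve, hfe, hc, hm⟩
    rw [modIntEq] at hm
    calc e = (e.map (pvSdChar ve)).map (pvSdChar (-ve)) := by rw [mapSdCancel]
      _ = ((wl.map (pvSdChar vw)).map (pvSdChar (-ve))) := by rw [show e.map (pvSdChar ve) = wl.map (pvSdChar vw) from hc]
      _ = wl.map (pvSdChar (vw + -ve)) := mapSdComp vw (-ve) wl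
      _ = wl.map (pvSdChar s) := mapSdCongr _ _ wl (by rw [show vw + -ve = vw - ve by ring, hm, Int.emod_eq_of_lt hs0 hs26])
  · rintro rfl
    refine ⟨(vw - s) % 26, ?_, ?_, ?_⟩
    · rw [firstLowerMapSd, hw]; rfl
    · unfold pvCanon
      rw [mapSdComp]
      exact mapSdCongr _ _ wl (by
        conv_lhs => rw [Int.add_emod]
        rw [Int.emod_emod_of_dvd _ (by norm_num : (26:Int) ∣ 26)]
        rw [← Int.add_emod]
        congr 1
        omega)
    · rw [modIntEq]
      rw [Int.sub_emod, Int.emod_emod_of_dvd _ (by norm_num : (26:Int) ∣ 26), ← Int.sub_emod]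
      rw [show vw - (vw - s) = s by ring, Int.emod_eq_of_lt hs0 hs26]

-- pairs foldl = filterMap
theorem pairsFoldl : ∀ (l : List String) (acc : List (List Char × Int)),
    l.foldl (fun ps e =>
      match pvFirstLower e.toList with
      | some v => ps ++ [(pvCanon v e.toList, v)]
      | none => ps) acc
      = acc ++ l.filterMap (fun e => (pvFirstLower e.toList).map (fun v => (pvCanon v e.toList, v)))
  | [], acc => by simp
  | e :: rest, acc => by
    simp only [List.foldl_cons, List.filterMap_cons]
    cases h : pvFirstLower e.toList with
    | none => simpa using pairsFoldl rest acc
    | some v => simp only [Option.map_some]; rw [pairsFoldl rest (acc ++ [(pvCanon v e.toList, v)])]; simp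

-- count over the filter/filterMap/map chain
theorem keyCount (key : List Char) (s vw : Int) : ∀ (L : List String),
    ((((L.filterMap (fun e => (pvFirstLower e.toList).map (fun v => (pvCanon v e.toList, v)))).filter
        (fun p => p.1 == key)).map (fun p => PySem.Int.mod (vw - p.2) 26)).count s)
      = L.countP (fun e =>
          match pvFirstLower e.toList with
          | some ve => pvCanon ve e.toList == key && PySem.Int.mod (vw - ve) 26 == s
          | none => false)
  | [] => rfl
  | e :: rest => by
    simp only [List.filterMap_cons, List.countP_cons]
    cases h : pvFirstLower e.toList with
    | none => simpa [h] using keyCount key s vw rest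
    | some ve =>
      simp only [Option.map_some, List.filter_cons]
      by_cases hk : (pvCanon ve e.toList == key) = true
      · simp only [hk, if_pos, List.map_cons, List.count_cons]
        rw [keyCount key s vw rest]
        by_cases hs : (PySem.Int.mod (vw - ve) 26 == s) = true
        · simp only [beq_iff_eq.mp hs]
          simp
        · simp
      · have hk' : (pvCanon ve e.toList == key) = false := by simpa using hk
        simp only [hk', Bool.false_eq_true, if_false]
        rw [keyCount key s vw rest]
        simp

-- on a Nodup list of strings the number whose toList equals t is the 0/1 membership indicator
theorem countPNodup (t : List Char) : ∀ (L : List String), L.Nodup →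
    L.countP (fun e => e.toList == t) = if L.any (fun e => e.toList == t) then 1 else 0
  | [], _ => rfl
  | e :: rest, h => by
    have hr := countPNodup t rest (List.nodup_cons.mp h).2
    simp only [List.countP_cons, List.any_cons]
    by_cases he : (e.toList == t) = true
    · have hnotin : rest.any (fun e => e.toList == t) = false := by
        rw [List.any_eq_false]
        intro x hx hxt
        have hx2 : x = e := String.toList_inj.mp (by rw [beq_iff_eq.mp hxt, beq_iff_eq.mp he])
        exact (List.nodup_cons.mp h).1 (hx2 ▸ hx)
      rw [hr]
      simp [he, hnotin]
    · have he' : (e.toList == t) = false := by simpa using he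
      rw [hr]
      simp [he']

theorem countFlatMap (s : Int) : ∀ (l : List (List Int)),
    (l.flatten).count s = (l.map (fun b => b.count s)).sum
  | [] => rfl
  | b :: rest => by
    simp only [List.flatten_cons, List.count_append, List.map_cons, List.sum_cons]
    rw [countFlatMap s rest]

theorem argmaxAux (f g : Int → Int) (C : Int) :
    ∀ (l : List Int) (stA stB : Int × Int), stA.1 = stB.1 → stA.2 = stB.2 + C →
      (∀ s ∈ l, f s = g s + C) →
      ((l.foldl (fun st s => if f s > st.2 then (s, f s) else st) stA).1
          = (l.foldl (fun st s => if g s > st.2 then (s, g s) else st) stB).1)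
      ∧ ((l.foldl (fun st s => if f s > st.2 then (s, f s) else st) stA).2
          = (l.foldl (fun st s => if g s > st.2 then (s, g s) else st) stB).2 + C)
  | [], stA, stB, h1, h2, _ => ⟨h1, h2⟩
  | s :: rest, stA, stB, h1, h2, hl => by
    simp only [List.foldl_cons]
    have hfs : f s = g s + C := hl s (List.mem_cons_self)
    by_cases hgt : g s > stB.2
    · have : f s > stA.2 := by omega
      rw [if_pos this, if_pos hgt]
      exact argmaxAux f g C rest _ _ rfl (by simpa using hfs) (fun x hx => hl x (List.mem_cons_of_mem _ hx))
    · have : ¬ f s > stA.2 := by omega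
      rw [if_neg this, if_neg hgt]
      exact argmaxAux f g C rest stA stB h1 h2 (fun x hx => hl x (List.mem_cons_of_mem _ hx))

set_option maxHeartbeats 1000000 in
theorem argmaxLoop (f g : Int → Int) (C : Int) (hC : 0 ≤ C)
    (hfg : ∀ s, 0 ≤ s → s < 26 → f s = g s + C) (hg0 : 0 ≤ g 0) :
    ((PySem.List.pyRange 0 26 1).foldl (fun st s => if f s > st.2 then (s, f s) else st) ((0:Int),(0:Int))).1 =
    ((PySem.List.pyRange 0 26 1).foldl (fun st s => if g s > st.2 then (s, g s) else st) ((0:Int),(0:Int))).1 := by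
  rw [PySem.List.pyRange_one_cons (by norm_num)]
  norm_num only
  simp only [List.foldl_cons]
  have hf0 : f 0 = g 0 + C := hfg 0 (by norm_num) (by norm_num)
  have hmem : ∀ s ∈ PySem.List.pyRange 1 26 1, f s = g s + C := by
    intro s hs
    have := (PySem.List.mem_pyRange_one (a:=1) (b:=26) (x:=s)).mp hs
    exact hfg s (by omega) (by omega)
  by_cases hg : g 0 > (0:Int)
  · rw [if_pos (show g 0 > ((0:Int),(0:Int)).2 from hg),
       if_pos (show f 0 > ((0:Int),(0:Int)).2 by show f 0 > (0:Int); omega)]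
    exact (argmaxAux f g C (PySem.List.pyRange 1 26 1) ((0:Int), f 0) ((0:Int), g 0) rfl (by simpa using hf0) hmem).1
  · rw [if_neg (show ¬ g 0 > ((0:Int),(0:Int)).2 from hg)]
    by_cases hfp : f 0 > (0:Int)
    · rw [if_pos (show f 0 > ((0:Int),(0:Int)).2 from hfp)]
      exact (argmaxAux f g C (PySem.List.pyRange 1 26 1) ((0:Int), f 0) ((0:Int),(0:Int)) rfl (by show f 0 = (0:Int) + C; omega) hmem).1
    · rw [if_neg (show ¬ f 0 > ((0:Int),(0:Int)).2 from hfp)]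
      exact (argmaxAux f g C (PySem.List.pyRange 1 26 1) ((0:Int),(0:Int)) ((0:Int),(0:Int)) rfl (by show (0:Int) = (0:Int) + C; omega) hmem).1

theorem votedFoldl (index : PySem.Dict (List Char) (List Int)) :
    ∀ (words : List (List Char)) (acc : List Int),
    words.foldl (fun acc word =>
        let w := PySem.Chars.lower word
        match pvFirstLower w with
        | some vw => (index.getD (pvCanon vw w) []).foldl (fun a ve => a ++ [PySem.Int.mod (vw - ve) 26]) acc
        | none => acc) acc
      = acc ++ (words.map (fun word =>
          match pvFirstLower (PySem.Chars.lower word) with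
          | some vw => (index.getD (pvCanon vw (PySem.Chars.lower word)) []).map (fun ve => PySem.Int.mod (vw - ve) 26)
          | none => [])).flatten
  | [], acc => by simp
  | word :: rest, acc => by
    simp only [List.foldl_cons, List.map_cons, List.flatten_cons]
    cases h : pvFirstLower (PySem.Chars.lower word) with
    | none => simpa [h] using votedFoldl index rest acc
    | some vw =>
      simp only [h]
      rw [PySem.List.foldl_append_singleton_eq_map]
      rw [votedFoldl index rest _]
      simp


-- per-word Int-valued indicator: is the shift-s decryption of this word in the dictionary?
theorem memAnyDedup (dictionary : List String) (t : List Char) :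
    ((PySem.Set.ofList dictionary : List String).any (fun e => e.toList == t))
      = (dictionary.any (fun e => e.toList == t)) := by
  rcases h : dictionary.any (fun e => e.toList == t) with _ | _
  · rw [List.any_eq_false] at h ⊢
    intro x hx
    exact h x ((PySem.Set.mem_ofList dictionary x).mp hx)
  · rw [List.any_eq_true] at h ⊢
    rcases h with ⟨x, hx, hp⟩
    exact ⟨x, (PySem.Set.mem_ofList dictionary x).mpr hx, hp⟩

-- the per-word vote-block count equals the membership indicator (0/1)
theorem perWordCount (dictionary : List String) (w : List Char) (vw : Int)
    (hw : pvFirstLower (PySem.Chars.lower w) = some vw) (s : Int) (hs0 : 0 ≤ s) (hs26 : s < 26) :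
    ((((pvIndexB dictionary).getD (pvCanon vw (PySem.Chars.lower w)) []).map
        (fun ve => PySem.Int.mod (vw - ve) 26)).count s : Int)
      = (if dictionary.any (fun e => e.toList == (PySem.Chars.lower w).map (pvSdChar s)) then (1:Int) else 0) := by
  have hidx : (pvIndexB dictionary).getD (pvCanon vw (PySem.Chars.lower w)) []
      = (((PySem.Set.ofList dictionary : List String).filterMap
            (fun e => (pvFirstLower e.toList).map (fun v => (pvCanon v e.toList, v)))).filter
          (fun p => p.1 == pvCanon vw (PySem.Chars.lower w))).map (fun p => p.2) := by
    unfold pvIndexB pvPairsB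
    rw [pairsFoldl]
    rw [List.nil_append]
    rw [PySem.Dict.getD_foldl_modify_append]
    simp
  rw [hidx, List.map_map]
  have hkc := keyCount (pvCanon vw (PySem.Chars.lower w)) s vw (PySem.Set.ofList dictionary : List String)
  have : ((((PySem.Set.ofList dictionary : List String).filterMap
            (fun e => (pvFirstLower e.toList).map (fun v => (pvCanon v e.toList, v)))).filter
          (fun p => p.1 == pvCanon vw (PySem.Chars.lower w))).map
            ((fun ve => PySem.Int.mod (vw - ve) 26) ∘ (fun p => p.2))).count s
      = ((PySem.Set.ofList dictionary : List String)).countP (fun e =>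
          match pvFirstLower e.toList with
          | some ve => pvCanon ve e.toList == pvCanon vw (PySem.Chars.lower w) && PySem.Int.mod (vw - ve) 26 == s
          | none => false) := hkc
  rw [this]
  have hcongr : ((PySem.Set.ofList dictionary : List String)).countP (fun e =>
          match pvFirstLower e.toList with
          | some ve => pvCanon ve e.toList == pvCanon vw (PySem.Chars.lower w) && PySem.Int.mod (vw - ve) 26 == s
          | none => false)
      = ((PySem.Set.ofList dictionary : List String)).countP (fun e => e.toList == (PySem.Chars.lower w).map (pvSdChar s)) := by
    apply List.countP_congr
    intro e _
    rcases he : pvFirstLower e.toList with _ | ve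
    · constructor
      · intro h; cases h
      · intro h
        exfalso
        have := (matchLemma e.toList (PySem.Chars.lower w) vw hw s hs0 hs26).mpr (beq_iff_eq.mp h)
        rcases this with ⟨ve, hve, _, _⟩
        rw [he] at hve; cases hve
    · constructor
      · intro h
        rcases (Bool.and_eq_true _ _).mp h with ⟨h1, h2⟩
        have := (matchLemma e.toList (PySem.Chars.lower w) vw hw s hs0 hs26).mp
          ⟨ve, he, beq_iff_eq.mp h1, beq_iff_eq.mp h2⟩
        exact beq_iff_eq.mpr this
      · intro h
        rcases (matchLemma e.toList (PySem.Chars.lower w) vw hw s hs0 hs26).mpr (beq_iff_eq.mp h) with ⟨ve', hve', hc, hm⟩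
        rw [he] at hve'
        cases hve'
        exact (Bool.and_eq_true _ _).mpr ⟨beq_iff_eq.mpr hc, beq_iff_eq.mpr hm⟩
  rw [hcongr]
  rw [countPNodup _ _ (PySem.Set.nodup_ofList dictionary)]
  rw [memAnyDedup]
  split_ifs <;> simp


theorem votesGetD (text : List Char) (dictionary : List String) (s : Int) :
    (pvVotesB text dictionary).getD s 0 = ((pvVotedB text dictionary).count s : Int) := by
  unfold pvVotesB
  rw [PySem.Dict.getD_foldl_insert_add_one]
  simp

theorem votedAsFlatten (text : List Char) (dictionary : List String) :
    pvVotedB text dictionary = ((PySem.Chars.split₀ text).map (fun word =>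
      match pvFirstLower (PySem.Chars.lower word) with
      | some vw => ((pvIndexB dictionary).getD (pvCanon vw (PySem.Chars.lower word)) []).map
          (fun ve => PySem.Int.mod (vw - ve) 26)
      | none => [])).flatten := by
  unfold pvVotedB
  rw [votedFoldl]
  simp

-- the constant part of A's score: words without a lowercase letter are fixed by every shift
def pvCconst (text : List Char) (dictionary : List String) : Int :=
  ((PySem.Chars.split₀ text).map (fun w =>
    match pvFirstLower (PySem.Chars.lower w) with
    | some _ => 0
    | none => if dictionary.any (fun e => e.toList == PySem.Chars.lower w) then (1:Int) else 0)).sum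

theorem votesSum (dictionary : List String) (s : Int) (hs0 : 0 ≤ s) (hs26 : s < 26) :
    ∀ words : List (List Char),
    ((((words.map (fun word =>
        match pvFirstLower (PySem.Chars.lower word) with
        | some vw => ((pvIndexB dictionary).getD (pvCanon vw (PySem.Chars.lower word)) []).map
            (fun ve => PySem.Int.mod (vw - ve) 26)
        | none => [])).flatten).count s : Nat) : Int)
      = (words.map (fun w =>
          match pvFirstLower (PySem.Chars.lower w) with
          | some _ => if dictionary.any (fun e => e.toList == (PySem.Chars.lower w).map (pvSdChar s)) then (1:Int) else 0
          | none => 0)).sum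
  | [] => by simp
  | w :: rest => by
    simp only [List.map_cons, List.flatten_cons, List.count_append, List.sum_cons, Nat.cast_add]
    rw [votesSum dictionary s hs0 hs26 rest]
    congr 1
    rcases hfw : pvFirstLower (PySem.Chars.lower w) with _ | vw
    · simp
    · simp only []
      exact perWordCount dictionary w vw hfw s hs0 hs26

theorem perShift (text : List Char) (dictionary : List String) (s : Int) (hs0 : 0 ≤ s) (hs26 : s < 26) :
    pvScoreA dictionary (text.foldl (fun acc c => acc ++ [pvDecChar s c]) [])
      = (pvVotesB text dictionary).getD s 0 + pvCconst text dictionary := by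
  have hdec : text.foldl (fun acc c => acc ++ [pvDecChar s c]) [] = text.map (pvDecChar s) := by
    simpa using PySem.List.foldl_append_singleton_eq_map (pvDecChar s) text []
  have hlow : ∀ w : List Char, PySem.Chars.lower (w.map (pvDecChar s)) = (PySem.Chars.lower w).map (pvSdChar s) := by
    intro w
    unfold PySem.Chars.lower
    rw [List.map_map, List.map_map]
    exact List.map_congr_left (fun c _ => lowerDecChar s c)
  unfold pvScoreA
  rw [hdec, split0Map _ (isspaceDecChar s), List.map_map]
  have hA : ((PySem.Chars.split₀ text).map ((fun w =>
        if dictionary.any (fun e => e.toList == PySem.Chars.lower w) then (1:Int) else 0) ∘ List.map (pvDecChar s)))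
      = (PySem.Chars.split₀ text).map (fun w =>
        if dictionary.any (fun e => e.toList == (PySem.Chars.lower w).map (pvSdChar s)) then (1:Int) else 0) := by
    apply List.map_congr_left
    intro w _
    simp only [Function.comp]
    rw [hlow w]
  rw [hA]
  rw [votesGetD, votedAsFlatten]
  rw [votesSum dictionary s hs0 hs26 (PySem.Chars.split₀ text)]
  have hsplit : ∀ w : List Char,
      (if dictionary.any (fun e => e.toList == (PySem.Chars.lower w).map (pvSdChar s)) then (1:Int) else 0)
        = (match pvFirstLower (PySem.Chars.lower w) with
            | some _ => if dictionary.any (fun e => e.toList == (PySem.Chars.lower w).map (pvSdChar s)) then (1:Int) else 0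
            | none => 0)
          + (match pvFirstLower (PySem.Chars.lower w) with
            | some _ => 0
            | none => if dictionary.any (fun e => e.toList == PySem.Chars.lower w) then (1:Int) else 0) := by
    intro w
    rcases hfw : pvFirstLower (PySem.Chars.lower w) with _ | vw
    · rw [mapSdOfFirstNone s _ hfw]
      simp
    · simp
  calc ((PySem.Chars.split₀ text).map (fun w =>
        if dictionary.any (fun e => e.toList == (PySem.Chars.lower w).map (pvSdChar s)) then (1:Int) else 0)).sum
      = ((PySem.Chars.split₀ text).map (fun w =>
          (match pvFirstLower (PySem.Chars.lower w) with
            | some _ => if dictionary.any (fun e => e.toList == (PySem.Chars.lower w).map (pvSdChar s)) then (1:Int) else 0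
            | none => 0)
          + (match pvFirstLower (PySem.Chars.lower w) with
            | some _ => 0
            | none => if dictionary.any (fun e => e.toList == PySem.Chars.lower w) then (1:Int) else 0))).sum := by
        exact congrArg List.sum (List.map_congr_left (fun w _ => hsplit w))
    _ = _ := by
        rw [PySem.List.sum_map_add_int]
        rfl

theorem cconstNonneg (text : List Char) (dictionary : List String) : 0 ≤ pvCconst text dictionary := by
  unfold pvCconst
  apply List.sum_nonneg
  intro x hx
  rcases List.mem_map.mp hx with ⟨w, _, rfl⟩
  rcases pvFirstLower (PySem.Chars.lower w) with _ | vw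
  · split_ifs
    all_goals norm_num
  · norm_num


-- ===== VERDICT (by name: the statement is the Claim_ definition above) =====
theorem caesar_breaker_brute_force_spec : Claim_equal_caesar_breaker_brute_force := by
  intro ciphertext dictionary _
  unfold Spec_caesar_breaker_brute_force caesar_breaker_brute_force caesar_breaker_brute_force_alt
  exact argmaxLoop
    (fun shift => pvScoreA dictionary (ciphertext.toList.foldl (fun acc c => acc ++ [pvDecChar shift c]) []))
    (fun s => (pvVotesB ciphertext.toList dictionary).getD s 0)
    (pvCconst ciphertext.toList dictionary)
    (cconstNonneg ciphertext.toList dictionary)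
    (fun s hs0 hs26 => perShift ciphertext.toList dictionary s hs0 hs26)
    (by show (0:Int) ≤ (pvVotesB ciphertext.toList dictionary).getD 0 0
        rw [votesGetD]; exact Int.natCast_nonneg _)
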